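-- pv_equiv track=rewrite | github.com/Nagendra594/codemind-python | minimum_elemnt_from_a_string.py | mi
-- ===== SOURCE A (Python) =====
-- def mi(a):
-- 	A=[]
-- 	for i in a:
-- 		A.append(ord(i))
-- 	m=min(A)
-- 	M=m+32
-- 	if M in A:
-- 		A.remove(m)
-- 		if M==min(A):
-- 			return chr(M)
-- 		else:
-- 			return chr(min(A))
-- 	else:
-- 		return chr(min(A))
-- ===== SOURCE B (Python) =====
-- def mi(a):
--     s = sorted(ord(c) for c in a)
--     if s[0] + 32 in s:
--         return chr(s[1])
--     return chr(s[0])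
-- ===== Notes on version B (the rewrite author's own statement) =====
-- stated objective: simpler
-- what changed: B sorts the ordinals once and indexes sorted[0]/sorted[1] directly, replacing A's append loop, min scan, membership test, remove and second min scan.
import Mathlib
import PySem

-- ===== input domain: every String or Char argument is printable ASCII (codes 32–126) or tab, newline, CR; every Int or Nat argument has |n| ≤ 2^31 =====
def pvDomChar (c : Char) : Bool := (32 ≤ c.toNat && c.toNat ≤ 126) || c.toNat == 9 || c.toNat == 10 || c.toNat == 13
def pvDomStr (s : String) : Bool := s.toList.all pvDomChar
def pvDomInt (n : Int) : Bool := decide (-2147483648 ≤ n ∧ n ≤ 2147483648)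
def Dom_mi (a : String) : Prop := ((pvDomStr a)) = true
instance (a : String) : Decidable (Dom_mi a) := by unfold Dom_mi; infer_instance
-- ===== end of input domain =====

-- B: sort the ordinals once and read sorted[0]/sorted[1], instead of A's min/remove/min scans; return values only (A raises on "" — excluded by Pre_).


-- chr(n): exact for 0 ≤ n < 0xD800, which holds for every ordinal reached here (Dom chars, +32)
def pyChr (n : Int) : String := String.ofList [Char.ofNat n.toNat]

-- ===== PORT A =====
def mi (a : String) : String :=
  let A := a.toList.foldl (fun acc i => acc ++ [((i.toNat : Int))]) ([] : List Int)
  match PySem.List.min? A (fun x => x) with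
  | none => ""            -- min([]) raises ValueError: excluded by Pre_mi
  | some m =>
    let M := m + 32
    if M ∈ A then
      match PySem.List.remove? A m with
      | none => ""        -- unreachable: m ∈ A
      | some A' =>
        match PySem.List.min? A' (fun x => x) with
        | none => ""      -- unreachable: M ∈ A'
        | some m2 => if M = m2 then pyChr M else pyChr m2
    else pyChr m

-- ===== PORT B =====
def mi_alt (a : String) : String :=
  let s := PySem.List.sorted (a.toList.map (fun c => ((c.toNat : Int)))) (fun x => x) false
  match PySem.List.pyGet? s 0 with
  | none => ""            -- s[0] raises IndexError on "": excluded by Pre_mi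
  | some m0 =>
    if m0 + 32 ∈ s then
      match PySem.List.pyGet? s 1 with
      | none => ""        -- unreachable: s has ≥ 2 elements here
      | some m1 => pyChr m1
    else pyChr m0

-- ===== PRECONDITION & SPEC =====
-- Pre_ excludes only the empty string, on which both A and B raise (ValueError / IndexError).
def Pre_mi (a : String) : Prop := a ≠ ""
instance (a : String) : Decidable (Pre_mi a) := by unfold Pre_mi; infer_instance
def pvWitness_mi : String := "bA"
def Spec_mi (a : String) (out : String) : Prop := out = mi_alt a
instance (a : String) (out : String) : Decidable (Spec_mi a out) := by unfold Spec_mi; infer_instance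

-- ===== CLAIM (what is proved, stated in full; the proofs are below) =====
def Claim_equal_mi : Prop := ∀ (a : String), Dom_mi a → Pre_mi a → Spec_mi a (mi a)

-- ===== LEMMAS AND PROOFS =====

theorem foldl_append_map (l : List Char) (init : List Int) :
    l.foldl (fun acc i => acc ++ [((i.toNat : Int))]) init
      = init ++ l.map (fun c => ((c.toNat : Int))) := by
  induction l generalizing init with
  | nil => simp
  | cons x t ih => simp [List.foldl, ih]

theorem min?_of_sorted_cons (xs : List Int) (m : Int) (t : List Int)
    (h : PySem.List.sorted xs (fun x => x) false = m :: t) :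
    PySem.List.min? xs (fun x => x) = some m := by
  have hxs : xs ≠ [] := by
    intro hn
    have := (PySem.List.sorted_eq_nil_iff xs (fun x => x) false).mpr hn
    rw [h] at this; exact absurd this (by simp)
  obtain ⟨v, hv⟩ : ∃ v, PySem.List.min? xs (fun x => x) = some v := by
    cases hmin : PySem.List.min? xs (fun x => x) with
    | none => exact absurd ((PySem.List.min?_eq_none_iff xs (fun x => x)).mp hmin) hxs
    | some v => exact ⟨v, rfl⟩
  have hvmem : v ∈ xs := PySem.List.min?_mem hv
  have hvmin : ∀ y ∈ xs, v ≤ y := PySem.List.min?_isMin hv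
  have hmmem : m ∈ xs := by
    have : m ∈ PySem.List.sorted xs (fun x => x) false := by rw [h]; exact List.mem_cons_self
    exact (PySem.List.mem_sorted xs (fun x => x) false m).mp this
  have hmle : ∀ y ∈ xs, m ≤ y := PySem.List.key_head_sorted_le xs (fun x => x) h
  have : v = m := le_antisymm (hvmin m hmmem) (hmle v hvmem)
  rw [hv, this]

theorem sorted_erase_head (xs : List Int) (m : Int) (t : List Int)
    (h : PySem.List.sorted xs (fun x => x) false = m :: t) :
    PySem.List.sorted (xs.erase m) (fun x => x) false = t := by
  have hperm : (PySem.List.sorted xs (fun x => x) false).Perm xs :=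
    PySem.List.sorted_perm xs (fun x => x) false
  have hpt : t.Perm (xs.erase m) := by
    have h2 := hperm.erase m
    rw [h] at h2
    simpa using h2
  have hpw : t.Pairwise (fun a b => a ≤ b) := by
    have h3 := PySem.List.sorted_pairwise xs (fun x => x)
    rw [h] at h3
    exact h3.of_cons
  exact PySem.List.sorted_id_eq_of_perm_of_pairwise (xs.erase m) t hpt hpw

-- ===== VERDICT (by name: the statement is the Claim_ definition above) =====
theorem mi_spec : Claim_equal_mi := by
  intro a _ hpre
  unfold Spec_mi mi mi_alt
  have hne : a.toList ≠ [] := by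
    intro hn
    exact hpre (by cases a with | ofByteArray b => simp_all)
  set L := a.toList.map (fun c => ((c.toNat : Int))) with hL
  have hLA : a.toList.foldl (fun acc i => acc ++ [((i.toNat : Int))]) ([] : List Int) = L := by
    simpa using foldl_append_map a.toList []
  have hLne : L ≠ [] := by simp [hL, hne]
  obtain ⟨m, t, hs⟩ : ∃ m t, PySem.List.sorted L (fun x => x) false = m :: t := by
    cases hso : PySem.List.sorted L (fun x => x) false with
    | nil => exact absurd ((PySem.List.sorted_eq_nil_iff L (fun x => x) false).mp hso) hLne
    | cons m t => exact ⟨m, t, rfl⟩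
  have hmin : PySem.List.min? L (fun x => x) = some m := min?_of_sorted_cons L m t hs
  have hget0 : PySem.List.pyGet? (m :: t) (0 : Int) = some m := by
    simp [PySem.List.pyGet?, PySem.List.pyIdx?]
  simp only [hLA, hmin, hs, hget0]
  have hmemIff : (m + 32 ∈ L) ↔ (m + 32 ∈ m :: t) :=
    (PySem.List.mem_sorted L (fun x => x) false (m + 32)).symm.trans (by rw [hs])
  by_cases hM : m + 32 ∈ L
  · have hM' : m + 32 ∈ m :: t := hmemIff.mp hM
    simp only [if_pos hM, if_pos hM']
    have hmmem : m ∈ L := by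
      have : m ∈ PySem.List.sorted L (fun x => x) false := by rw [hs]; exact List.mem_cons_self
      exact (PySem.List.mem_sorted L (fun x => x) false m).mp this
    rw [PySem.List.remove?_eq_some_erase L m hmmem]
    have hMe : m + 32 ∈ L.erase m :=
      (List.mem_erase_of_ne (by omega : m + 32 ≠ m)).mpr hM
    have hste : PySem.List.sorted (L.erase m) (fun x => x) false = t := sorted_erase_head L m t hs
    obtain ⟨x, t', ht⟩ : ∃ x t', t = x :: t' := by
      cases htc : t with
      | nil =>
        exfalso
        have h4 : L.erase m = [] := (PySem.List.sorted_eq_nil_iff (L.erase m) (fun x => x) false).mp (by rw [hste, htc])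
        rw [h4] at hMe; exact absurd hMe (List.not_mem_nil)
      | cons x t' => exact ⟨x, t', rfl⟩
    have hmin2 : PySem.List.min? (L.erase m) (fun x => x) = some x :=
      min?_of_sorted_cons _ x t' (by rw [hste, ht])
    have hget1 : PySem.List.pyGet? (m :: t) (1 : Int) = some x := by
      rw [ht]; simp [PySem.List.pyGet?, PySem.List.pyIdx?]
    simp only [hmin2, hget1]
    by_cases hmx : m + 32 = x
    · simp [hmx]
    · simp only [if_neg hmx]
  · have hM' : m + 32 ∉ m :: t := fun h => hM (hmemIff.mpr h)
    simp only [if_neg hM, if_neg hM']
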